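-- pv_equiv track=rewrite | github.com/Jiw00n/bayes_analytic | gallery/constrained_gen_bak/modules/exact_gpu_constraints.py | _enumerate_group_assignments
-- ===== SOURCE A (Python) =====
-- def _divisors(n):
--     if n <= 0:
--         return [1]
--     divs = []
--     for i in range(1, int(n**0.5) + 1):
--         if n % i == 0:
--             divs.append(i)
--             if i != n // i:
--                 divs.append(n // i)
--     return sorted(divs)
--
-- def _enumerate_group_assignments(step_idx, group_names, sp_extents, innermost_names, innermost_limit):
--     extent = sp_extents.get(step_idx)
--     if extent is None:
--         return [{}]
--
--     results = []
--
--     def dfs(name_idx, remaining, current):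
--         name = group_names[name_idx]
--         candidates = _divisors(remaining)
--         if name in innermost_names:
--             candidates = [c for c in candidates if c <= innermost_limit]
--         for chosen in candidates:
--             current[name] = chosen
--             if name_idx + 1 == len(group_names):
--                 results.append(dict(current))
--             else:
--                 next_remaining = (remaining + chosen - 1) // chosen
--                 dfs(name_idx + 1, next_remaining, current)
--             current.pop(name, None)
--
--     dfs(0, extent, {})
--     return results
-- ===== SOURCE B (Python) =====
-- def _divisors(n):
--     if n <= 0:
--         return [1]
--     divs = []
--     for i in range(1, int(n**0.5) + 1):
--         if n % i == 0:
--             divs.append(i)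
--             if i != n // i:
--                 divs.append(n // i)
--     return sorted(divs)
--
-- def _enumerate_group_assignments(step_idx, group_names, sp_extents, innermost_names, innermost_limit):
--     extent = sp_extents.get(step_idx)
--     if extent is None:
--         return [{}]
--     # breadth-first: expand one group name per level over a list of partial states
--     partials = [(extent, {})]
--     for name in group_names:
--         new_partials = []
--         for remaining, assignment in partials:
--             for c in _divisors(remaining):
--                 if name in innermost_names and c > innermost_limit:
--                     continue
--                 new_partials.append(((remaining + c - 1) // c, {**assignment, name: c}))
--         partials = new_partials
--     return [assignment for _, assignment in partials]
-- ===== Notes on version B (the rewrite author's own statement) =====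
-- stated objective: alternative
-- what changed: Replaces the recursive backtracking DFS over one shared mutable dict (insert, recurse, pop) with a level-by-level breadth-first fold over group_names that expands a list of immutable partial (remaining, assignment) states; _divisors is kept unchanged.
import Mathlib
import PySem

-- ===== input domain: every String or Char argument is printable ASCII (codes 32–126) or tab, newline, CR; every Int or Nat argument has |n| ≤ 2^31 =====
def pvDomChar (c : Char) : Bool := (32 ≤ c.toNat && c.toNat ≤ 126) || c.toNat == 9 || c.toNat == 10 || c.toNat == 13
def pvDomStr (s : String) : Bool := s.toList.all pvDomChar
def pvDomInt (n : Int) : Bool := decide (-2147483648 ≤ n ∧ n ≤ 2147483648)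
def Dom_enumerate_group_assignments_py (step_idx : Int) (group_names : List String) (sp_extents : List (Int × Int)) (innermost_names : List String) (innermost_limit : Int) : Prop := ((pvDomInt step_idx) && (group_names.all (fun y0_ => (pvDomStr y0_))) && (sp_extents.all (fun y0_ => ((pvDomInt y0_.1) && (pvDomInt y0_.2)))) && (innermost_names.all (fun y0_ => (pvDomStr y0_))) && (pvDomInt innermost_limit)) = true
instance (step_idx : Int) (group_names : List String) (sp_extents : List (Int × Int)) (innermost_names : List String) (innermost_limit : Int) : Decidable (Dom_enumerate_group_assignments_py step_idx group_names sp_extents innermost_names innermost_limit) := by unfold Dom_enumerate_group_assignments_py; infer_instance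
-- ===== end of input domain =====

-- B replaces A's recursive backtracking DFS over one shared mutable dict with a level-by-level
-- breadth-first expansion of immutable partial states (objective: alternative decomposition, same cost).


-- ===== PORT A =====
-- _divisors, identical in Source A and Source B (shared helper).
-- int(n**0.5) = Nat.sqrt n.toNat exactly for 0 < n ≤ 2^31 (double sqrt is correctly rounded there).
def pyDivisors (n : Int) : List Int :=
  if n ≤ 0 then [1]
  else
    let divs := (PySem.List.pyRange 1 (((Nat.sqrt n.toNat : Nat) : Int) + 1)).foldl
      (fun divs i =>
        if PySem.Int.mod n i = 0 then
          let divs := divs ++ [i]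
          if i ≠ PySem.Int.floordiv n i then divs ++ [PySem.Int.floordiv n i] else divs
        else divs) []
    PySem.List.sorted divs (fun x => x)

-- A's inner dfs, recursing on the suffix of group_names ([] = past the last index;
-- the initial call with group_names = [] is an IndexError in Python, excluded by Pre_).
def dfsA (innermost_names : List String) (innermost_limit : Int) :
    List String → Int → PySem.Dict String Int → List (PySem.Dict String Int)
  | [], _, _ => []
  | name :: rest, remaining, current =>
    let candidates := pyDivisors remaining
    let candidates := if innermost_names.contains name then candidates.filter (fun c => decide (c ≤ innermost_limit)) else candidates
    (candidates.foldl
      (fun acc chosen =>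
        let cur := acc.2.insert name chosen
        match rest with
        | [] => (acc.1 ++ [cur], cur.erase name)   -- results.append(dict(current)); current.pop(name, None)
        | _ :: _ => (acc.1 ++ dfsA innermost_names innermost_limit rest (PySem.Int.floordiv (remaining + chosen - 1) chosen) cur, cur.erase name))
      ([], current)).1

def enumerate_group_assignments_py (step_idx : Int) (group_names : List String) (sp_extents : List (Int × Int)) (innermost_names : List String) (innermost_limit : Int) : List (List (String × Int)) :=
  match (PySem.Dict.ofList sp_extents).get? step_idx with
  | none => [[]]
  | some extent => (dfsA innermost_names innermost_limit group_names extent PySem.Dict.empty).map PySem.Dict.items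

-- ===== PORT B =====
def enumerate_group_assignments_py_alt (step_idx : Int) (group_names : List String) (sp_extents : List (Int × Int)) (innermost_names : List String) (innermost_limit : Int) : List (List (String × Int)) :=
  match (PySem.Dict.ofList sp_extents).get? step_idx with
  | none => [[]]
  | some extent =>
    let partials := group_names.foldl
      (fun partials name =>
        partials.foldl
          (fun new_partials p =>
            (pyDivisors p.1).foldl
              (fun new_partials c =>
                if innermost_names.contains name && decide (innermost_limit < c) then new_partials
                else new_partials ++ [(PySem.Int.floordiv (p.1 + c - 1) c, p.2.insert name c)])
              new_partials)
          [])
      [(extent, PySem.Dict.empty)]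
    partials.map (fun p => p.2.items)

-- ===== PRECONDITION & SPEC =====
-- Pre_ excludes (a) an empty group_names when sp_extents has an entry for step_idx (A raises
-- IndexError there), and (b) duplicate group names, where A's pop/re-insert mutation of the one
-- shared dict makes the key order of the returned dicts accidental.
def Pre_enumerate_group_assignments_py (step_idx : Int) (group_names : List String) (sp_extents : List (Int × Int)) (innermost_names : List String) (innermost_limit : Int) : Prop :=
  ((PySem.Dict.ofList sp_extents).get? step_idx).isSome → (group_names ≠ [] ∧ group_names.Nodup)
instance (step_idx : Int) (group_names : List String) (sp_extents : List (Int × Int)) (innermost_names : List String) (innermost_limit : Int) : Decidable (Pre_enumerate_group_assignments_py step_idx group_names sp_extents innermost_names innermost_limit) := by unfold Pre_enumerate_group_assignments_py; infer_instance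

def pvWitness_enumerate_group_assignments_py : Int × List String × (List (Int × Int)) × List String × Int := (0, ["a"], [(0, 4)], [], 5)

def Spec_enumerate_group_assignments_py (step_idx : Int) (group_names : List String) (sp_extents : List (Int × Int)) (innermost_names : List String) (innermost_limit : Int) (out : List (List (String × Int))) : Prop := out = enumerate_group_assignments_py_alt step_idx group_names sp_extents innermost_names innermost_limit
instance (step_idx : Int) (group_names : List String) (sp_extents : List (Int × Int)) (innermost_names : List String) (innermost_limit : Int) (out : List (List (String × Int))) : Decidable (Spec_enumerate_group_assignments_py step_idx group_names sp_extents innermost_names innermost_limit out) := by unfold Spec_enumerate_group_assignments_py; infer_instance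

-- ===== CLAIM (what is proved, stated in full; the proofs are below) =====
def Claim_equal_enumerate_group_assignments_py : Prop := ∀ (step_idx : Int) (group_names : List String) (sp_extents : List (Int × Int)) (innermost_names : List String) (innermost_limit : Int), Dom_enumerate_group_assignments_py step_idx group_names sp_extents innermost_names innermost_limit → Pre_enumerate_group_assignments_py step_idx group_names sp_extents innermost_names innermost_limit → Spec_enumerate_group_assignments_py step_idx group_names sp_extents innermost_names innermost_limit (enumerate_group_assignments_py step_idx group_names sp_extents innermost_names innermost_limit)

-- ===== LEMMAS AND PROOFS =====

-- the candidate list of one level (A's expression)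
def pvCands (inn : List String) (lim : Int) (name : String) (r : Int) : List Int :=
  if inn.contains name then (pyDivisors r).filter (fun c => decide (c ≤ lim)) else pyDivisors r

-- one expansion step of B, in flatMap form
def pvStep (inn : List String) (lim : Int) (name : String) (p : Int × PySem.Dict String Int) : List (Int × PySem.Dict String Int) :=
  (pvCands inn lim name p.1).map (fun c => (PySem.Int.floordiv (p.1 + c - 1) c, p.2.insert name c))

def pvLevel (inn : List String) (lim : Int) (ps : List (Int × PySem.Dict String Int)) (name : String) : List (Int × PySem.Dict String Int) :=
  ps.flatMap (pvStep inn lim name)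

lemma pv_erase_insert (d : PySem.Dict String Int) (k : String) (v : Int) (h : d.contains k = false) :
    (d.insert k v).erase k = d := by
  have hall : ∀ p ∈ d.items, (p.1 == k) = false := by
    intro p hp
    have h' := h
    simp only [PySem.Dict.contains, List.any_eq_false] at h'
    simpa using h' p hp
  have hins : (d.insert k v).items = d.items ++ [(k, v)] := by
    unfold PySem.Dict.insert
    rw [h]
    simp
  apply PySem.Dict.ext
  unfold PySem.Dict.erase
  rw [hins, List.filter_append, List.filter_eq_self.mpr (fun p hp => by simp [hall p hp])]
  simp

lemma pv_flatMap_single {β : Type} (l : List Int) (f : Int → β) :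
    l.flatMap (fun c => [f c]) = l.map f := by
  induction l with
  | nil => rfl
  | cons x xs ih => simp [ih]

lemma pv_dfs_loop (name : String) (body : Int → PySem.Dict String Int → List (PySem.Dict String Int)) :
    ∀ (cs : List Int) (res : List (PySem.Dict String Int)) (cur : PySem.Dict String Int),
      cur.contains name = false →
      cs.foldl (fun acc chosen =>
          (acc.1 ++ body chosen (acc.2.insert name chosen), (acc.2.insert name chosen).erase name))
        (res, cur)
      = (res ++ cs.flatMap (fun c => body c (cur.insert name c)), cur)
  | [], res, cur, _ => by simp
  | c :: cs, res, cur, h => by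
    simp only [List.foldl_cons, pv_erase_insert cur name c h]
    rw [pv_dfs_loop name body cs (res ++ body c (cur.insert name c)) cur h]
    simp

lemma pv_dfsA_flatMap (inn : List String) (lim : Int) (name : String) (rest : List String)
    (r : Int) (cur : PySem.Dict String Int) (h : cur.contains name = false) :
    dfsA inn lim (name :: rest) r cur
      = (pvCands inn lim name r).flatMap (fun c =>
          match rest with
          | [] => [cur.insert name c]
          | _ :: _ => dfsA inn lim rest (PySem.Int.floordiv (r + c - 1) c) (cur.insert name c)) := by
  cases rest with
  | nil =>
    show ((pvCands inn lim name r).foldl _ ([], cur)).1 = _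
    rw [pv_dfs_loop name (fun _ cur' => [cur']) _ [] cur h]
    simp
  | cons hd tl =>
    show ((pvCands inn lim name r).foldl _ ([], cur)).1 = _
    rw [pv_dfs_loop name
      (fun chosen cur' => dfsA inn lim (hd :: tl) (PySem.Int.floordiv (r + chosen - 1) chosen) cur') _ [] cur h]
    simp

lemma pv_level_nil (inn : List String) (lim : Int) (names : List String) :
    names.foldl (pvLevel inn lim) [] = [] := by
  induction names with
  | nil => rfl
  | cons n ns ih => simpa [pvLevel] using ih

lemma pv_level_append (inn : List String) (lim : Int) (names : List String) :
    ∀ (p q : List (Int × PySem.Dict String Int)),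
      names.foldl (pvLevel inn lim) (p ++ q)
        = names.foldl (pvLevel inn lim) p ++ names.foldl (pvLevel inn lim) q := by
  induction names with
  | nil => intro p q; simp
  | cons n ns ih =>
    intro p q
    simp only [List.foldl_cons, pvLevel, List.flatMap_append]
    exact ih _ _

lemma pv_level_flatMap (inn : List String) (lim : Int) (names : List String)
    (h : α → List (Int × PySem.Dict String Int)) :
    ∀ (ps : List α),
      names.foldl (pvLevel inn lim) (ps.flatMap h)
        = ps.flatMap (fun x => names.foldl (pvLevel inn lim) (h x)) := by
  intro ps
  induction ps with
  | nil => simpa using pv_level_nil inn lim names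
  | cons x xs ih =>
    simp only [List.flatMap_cons, pv_level_append, ih]

lemma pv_dfsA_eq_levels (inn : List String) (lim : Int) :
    ∀ (names : List String) (r : Int) (cur : PySem.Dict String Int),
      names ≠ [] → names.Nodup → (∀ m ∈ names, cur.contains m = false) →
      dfsA inn lim names r cur
        = (names.foldl (pvLevel inn lim) [(r, cur)]).map Prod.snd
  | [], _, _, hne, _, _ => absurd rfl hne
  | name :: rest, r, cur, _, hnd, hcont => by
    have hc : cur.contains name = false := hcont name (by simp)
    rw [pv_dfsA_flatMap inn lim name rest r cur hc]
    have hstep : pvLevel inn lim [(r, cur)] name = (pvCands inn lim name r).flatMap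
        (fun c => [(PySem.Int.floordiv (r + c - 1) c, cur.insert name c)]) := by
      simp [pvLevel, pvStep, pv_flatMap_single]
    cases rest with
    | nil =>
      simp [hstep, pv_flatMap_single]
    | cons hd tl =>
      simp only [List.foldl_cons, hstep,
        pv_level_flatMap inn lim (hd :: tl) _ (pvCands inn lim name r), List.map_flatMap]
      have hfun : ∀ c : Int,
          dfsA inn lim (hd :: tl) (PySem.Int.floordiv (r + c - 1) c) (cur.insert name c)
            = ((hd :: tl).foldl (pvLevel inn lim)
                [(PySem.Int.floordiv (r + c - 1) c, cur.insert name c)]).map Prod.snd := by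
        intro c
        apply pv_dfsA_eq_levels inn lim (hd :: tl)
        · simp
        · exact hnd.of_cons
        · intro m hm
          rw [PySem.Dict.contains_insert]
          have hmne : m ≠ name := by
            rintro rfl
            exact (List.nodup_cons.mp hnd).1 hm
          simp [hmne, hcont m (List.mem_cons_of_mem _ hm)]
      simp only [hfun]
      simp

lemma pv_altB_levels (inn : List String) (lim : Int) (names : List String) :
    ∀ (init : List (Int × PySem.Dict String Int)),
      names.foldl
        (fun partials name =>
          partials.foldl
            (fun new_partials p =>
              (pyDivisors p.1).foldl
                (fun new_partials c =>
                  if inn.contains name && decide (lim < c) then new_partials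
                  else new_partials ++ [(PySem.Int.floordiv (p.1 + c - 1) c, p.2.insert name c)])
                new_partials)
            [])
        init
      = names.foldl (pvLevel inn lim) init := by
  induction names with
  | nil => intro init; rfl
  | cons name ns ih =>
    intro init
    rw [List.foldl_cons, List.foldl_cons, ih]
    congr 1
    have hinner : ∀ (p : Int × PySem.Dict String Int) (acc : List (Int × PySem.Dict String Int)),
        (pyDivisors p.1).foldl
          (fun new_partials c =>
            if inn.contains name && decide (lim < c) then new_partials
            else new_partials ++ [(PySem.Int.floordiv (p.1 + c - 1) c, p.2.insert name c)])
          acc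
        = acc ++ pvStep inn lim name p := by
      intro p acc
      have hshape : (fun (new_partials : List (Int × PySem.Dict String Int)) (c : Int) =>
          if inn.contains name && decide (lim < c) then new_partials
          else new_partials ++ [(PySem.Int.floordiv (p.1 + c - 1) c, p.2.insert name c)])
        = (fun new_partials c =>
          if (!(inn.contains name && decide (lim < c))) = true
          then new_partials ++ [(PySem.Int.floordiv (p.1 + c - 1) c, p.2.insert name c)]
          else new_partials) := by
        funext acc' c
        cases hq : inn.contains name && decide (lim < c) <;> simp [hq]
      rw [hshape, PySem.List.foldl_append_if]
      congr 1
      unfold pvStep pvCands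
      cases hin : inn.contains name with
      | false => simp
      | true =>
        congr 1
        apply List.filter_congr
        intro c _
        simp only [Bool.true_and]
        rw [← decide_not, decide_eq_decide]
        omega
    have hbody : (fun (new_partials : List (Int × PySem.Dict String Int)) (p : Int × PySem.Dict String Int) =>
        (pyDivisors p.1).foldl
          (fun new_partials c =>
            if inn.contains name && decide (lim < c) then new_partials
            else new_partials ++ [(PySem.Int.floordiv (p.1 + c - 1) c, p.2.insert name c)])
          new_partials)
        = (fun acc p => acc ++ pvStep inn lim name p) := by
      funext acc p
      exact hinner p acc
    rw [hbody, PySem.List.foldl_append_eq_flatMap]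
    simp [pvLevel]

-- ===== VERDICT (by name: the statement is the Claim_ definition above) =====
theorem enumerate_group_assignments_py_spec : Claim_equal_enumerate_group_assignments_py := by
  intro step_idx group_names sp_extents innermost_names innermost_limit _ hpre
  unfold Spec_enumerate_group_assignments_py
  unfold enumerate_group_assignments_py enumerate_group_assignments_py_alt
  cases hget : (PySem.Dict.ofList sp_extents).get? step_idx with
  | none => rfl
  | some extent =>
    obtain ⟨hne, hnd⟩ := hpre (by simp [hget])
    simp only []
    rw [pv_altB_levels, pv_dfsA_eq_levels innermost_names innermost_limit group_names extent
      PySem.Dict.empty hne hnd (by intro m _; simp [PySem.Dict.contains, PySem.Dict.empty])]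
    simp [List.map_map, Function.comp]
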